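-- pv_equiv track=rewrite | github.com/AbdulhameedAjibola/learnPython | loops.py | translator
-- ===== SOURCE A (Python) =====
-- def translator(sentence):
--
--     translation = ""
--     for letter in sentence:
--         if letter in "AEIOUaeiou":
--             translation = translation + "ba"
--         else:
--             translation = translation + letter
--
--     return translation
-- ===== SOURCE B (Python) =====
-- def translator(sentence):
--     # Staged global-replace passes: one str.replace per vowel.
--     # 'a' is processed FIRST, so the 'a' inside an inserted "ba" (introduced by any
--     # later pass) is never revisited, and no later vowel equals 'b' or 'a'.
--     for v in "aeiouAEIOU":
--         sentence = sentence.replace(v, "ba")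
--     return sentence
-- ===== Notes on version B (the rewrite author's own statement) =====
-- stated objective: alternative
-- what changed: Replaces A's single per-character loop (branch plus repeated concatenation) with ten staged global str.replace passes, one per vowel, ordered with 'a' first so the 'a' inside an inserted "ba" is never re-replaced.
import Mathlib
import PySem

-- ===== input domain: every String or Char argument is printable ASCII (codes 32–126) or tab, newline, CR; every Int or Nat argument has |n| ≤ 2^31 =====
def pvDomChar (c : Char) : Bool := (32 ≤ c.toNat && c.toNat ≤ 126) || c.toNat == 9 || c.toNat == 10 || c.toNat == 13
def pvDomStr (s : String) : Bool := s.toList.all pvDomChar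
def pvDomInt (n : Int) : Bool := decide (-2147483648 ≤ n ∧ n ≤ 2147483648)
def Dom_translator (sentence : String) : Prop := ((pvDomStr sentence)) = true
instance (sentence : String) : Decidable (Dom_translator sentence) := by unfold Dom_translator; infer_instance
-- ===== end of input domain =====

-- B replaces A's single per-character loop (branch + repeated concatenation) by ten staged
-- global str.replace passes, one per vowel, 'a' first so inserted "ba" is never revisited.

-- ===== PORT A =====
-- the string literal "AEIOUaeiou" as characters ('letter in "AEIOUaeiou"' is char membership)
def pvVowels : List Char := ['A', 'E', 'I', 'O', 'U', 'a', 'e', 'i', 'o', 'u']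

-- A: left fold over the characters, appending "ba" for a vowel, else the letter itself.
def translator (sentence : String) : String :=
  String.ofList (sentence.toList.foldl
    (fun translation letter =>
      if letter ∈ pvVowels then translation ++ ['b', 'a'] else translation ++ [letter])
    [])

-- ===== PORT B =====
-- B's pass order: the characters of "aeiouAEIOU", in order
def pvVowelOrder : List Char := ['a', 'e', 'i', 'o', 'u', 'A', 'E', 'I', 'O', 'U']

-- s.replace(v, "ba") for a single-character pattern v: exact left-to-right scan,
-- each occurrence of v replaced by "ba" (exactly Python's str.replace for a 1-char old)
def pvRepl (v : Char) : List Char → List Char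
  | [] => []
  | c :: t => (if c = v then ['b', 'a'] else [c]) ++ pvRepl v t

-- B: fold of the ten replace passes over the sentence
def translator_alt (sentence : String) : String :=
  String.ofList (pvVowelOrder.foldl (fun acc v => pvRepl v acc) sentence.toList)

-- ===== PRECONDITION & SPEC =====
def Spec_translator (sentence : String) (out : String) : Prop := out = translator_alt sentence
instance (sentence : String) (out : String) : Decidable (Spec_translator sentence out) := by unfold Spec_translator; infer_instance

-- ===== CLAIM =====
def Claim_equal_translator : Prop := ∀ (sentence : String), Dom_translator sentence → Spec_translator sentence (translator sentence)

-- ===== LEMMAS AND PROOFS =====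

theorem pvRepl_append (v : Char) (x y : List Char) :
    pvRepl v (x ++ y) = pvRepl v x ++ pvRepl v y := by
  induction x with
  | nil => rfl
  | cons c t ih => simp [pvRepl, ih]

theorem chain_append (x y : List Char) :
    pvVowelOrder.foldl (fun acc v => pvRepl v acc) (x ++ y) =
      pvVowelOrder.foldl (fun acc v => pvRepl v acc) x ++
      pvVowelOrder.foldl (fun acc v => pvRepl v acc) y := by
  simp [pvVowelOrder, pvRepl_append]

theorem chain_single (c : Char) :
    pvVowelOrder.foldl (fun acc v => pvRepl v acc) [c] =
      (if c ∈ pvVowels then ['b', 'a'] else [c]) := by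
  by_cases h : c ∈ pvVowels
  · fin_cases h <;> simp [pvVowelOrder, pvVowels, pvRepl]
  · have hc : ∀ v ∈ pvVowelOrder, c ≠ v := by
      intro v hv e
      exact h (e ▸ (by fin_cases hv <;> simp [pvVowels] : v ∈ pvVowels))
    simp [pvVowelOrder, pvRepl, h,
      hc 'a' (by simp [pvVowelOrder]), hc 'e' (by simp [pvVowelOrder]),
      hc 'i' (by simp [pvVowelOrder]), hc 'o' (by simp [pvVowelOrder]),
      hc 'u' (by simp [pvVowelOrder]), hc 'A' (by simp [pvVowelOrder]),
      hc 'E' (by simp [pvVowelOrder]), hc 'I' (by simp [pvVowelOrder]),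
      hc 'O' (by simp [pvVowelOrder]), hc 'U' (by simp [pvVowelOrder])]

theorem chain_flatMap (l : List Char) :
    pvVowelOrder.foldl (fun acc v => pvRepl v acc) l =
      l.flatMap (fun c => if c ∈ pvVowels then ['b', 'a'] else [c]) := by
  induction l with
  | nil => rfl
  | cons c t ih =>
    have : (c :: t) = [c] ++ t := rfl
    rw [this, chain_append, chain_single, ih]
    simp

theorem translator_fold (l : List Char) (s : List Char) :
    (l.foldl
      (fun translation letter =>
        if letter ∈ pvVowels then translation ++ ['b', 'a'] else translation ++ [letter])
      s) = s ++ l.flatMap (fun c => if c ∈ pvVowels then ['b', 'a'] else [c]) := by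
  induction l generalizing s with
  | nil => simp
  | cons c t ih =>
    simp only [List.foldl_cons, List.flatMap_cons]
    by_cases h : c ∈ pvVowels
    · simp [h, ih]
    · simp [h, ih]

-- ===== VERDICT =====
theorem translator_spec : Claim_equal_translator := by
  intro s _
  show _ = _
  simp [translator, translator_alt, chain_flatMap, translator_fold]
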